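-- pv_equiv track=rewrite | github.com/jerefrer/generate-printable-pecha | lib/ordered_page_numbers/ordered_page_numbers.py | ordered_page_numbers
-- ===== SOURCE A (Python) =====
-- import math
--
-- def stack_size(one_sided_pecha_pages, stacks=3):
--     """Determines how many one-sided pages will be in the thickest stack after cutting"""
--
--     if one_sided_pecha_pages == 1:
--         return 1
--
--     return math.ceil(one_sided_pecha_pages / (stacks * 2)) * 2
--
-- def ordered_page_numbers(number_of_one_sided_pecha_pages, number_of_stacks=3):
--     """generates a string to be given to pdfjam to put pages in order for printing"""
--
--     number_of_dual_sided_printable_pages = math.ceil(number_of_one_sided_pecha_pages / (number_of_stacks * 2))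
--     one_sided_pecha_pages_per_stack = stack_size(number_of_one_sided_pecha_pages, number_of_stacks)
--
--     def appendIfExists(p):
--       page_numbers.append(p if p <= number_of_one_sided_pecha_pages else '{}')
--
--     def stackStart(stack_number):
--       return (stack_number - 1) * one_sided_pecha_pages_per_stack + 1
--
--     page_numbers = []
--
--     for i in range(number_of_dual_sided_printable_pages):
--       delta_recto = i * 2
--       delta_verso = delta_recto + 1
--       appendIfExists(stackStart(1)+delta_recto)
--       appendIfExists(stackStart(2)+delta_recto)
--       appendIfExists(stackStart(3)+delta_recto)
--       appendIfExists(stackStart(3)+delta_verso)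
--       appendIfExists(stackStart(2)+delta_verso)
--       appendIfExists(stackStart(1)+delta_verso)
--
--     return ','.join(map(str, page_numbers))
-- ===== SOURCE B (Python) =====
-- import math
--
-- def ordered_page_numbers(number_of_one_sided_pecha_pages, number_of_stacks=3):
--     """Build the three per-stack columns of (recto, verso) cells first, then
--     interleave them row by row (1r,2r,3r,3v,2v,1v)."""
--     n = number_of_one_sided_pecha_pages
--     dual_pages = math.ceil(n / (number_of_stacks * 2))
--     per_stack = 1 if n == 1 else math.ceil(n / (number_of_stacks * 2)) * 2
--
--     def cell(p):
--         return str(p) if p <= n else '{}'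
--
--     def column(stack_number):
--         start = (stack_number - 1) * per_stack + 1
--         col = []
--         for i in range(dual_pages):
--             r = start + i * 2
--             col.append((cell(r), cell(r + 1)))
--         return col
--
--     c1, c2, c3 = column(1), column(2), column(3)
--     parts = []
--     for (r1, v1), (r2, v2), (r3, v3) in zip(c1, c2, c3):
--         parts.extend([r1, r2, r3, v3, v2, v1])
--     return ','.join(parts)
-- ===== Notes on version B (the rewrite author's own statement) =====
-- stated objective: alternative
-- what changed: B first builds three per-stack column lists of (recto, verso) cells and then interleaves them row by row via zip, instead of A's single unrolled loop with six appends per dual page.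
import Mathlib
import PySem

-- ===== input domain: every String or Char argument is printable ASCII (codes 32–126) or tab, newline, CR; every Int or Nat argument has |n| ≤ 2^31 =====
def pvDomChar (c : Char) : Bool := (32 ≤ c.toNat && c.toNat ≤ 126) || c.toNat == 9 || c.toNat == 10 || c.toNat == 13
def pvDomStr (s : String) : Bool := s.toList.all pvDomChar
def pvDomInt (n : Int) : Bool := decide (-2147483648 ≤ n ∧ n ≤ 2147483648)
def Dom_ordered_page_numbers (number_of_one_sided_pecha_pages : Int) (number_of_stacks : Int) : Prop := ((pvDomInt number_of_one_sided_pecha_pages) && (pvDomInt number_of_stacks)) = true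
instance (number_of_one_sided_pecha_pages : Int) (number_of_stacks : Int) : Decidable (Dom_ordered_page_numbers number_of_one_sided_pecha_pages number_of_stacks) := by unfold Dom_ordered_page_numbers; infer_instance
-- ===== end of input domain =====

-- B builds the three per-stack (recto, verso) columns first and then interleaves
-- them row by row, instead of A's single unrolled six-append loop (objective: alternative).

-- ===== PORT A =====
-- math.ceil(a / b) for ints, exact on |a| ≤ 2^31 (float division is exact enough there)
def pvCeil (a b : Int) : Int := -(PySem.Int.floordiv (-a) b)

def pvStackSize (one_sided_pecha_pages : Int) (stks : Int) : Int :=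
  if one_sided_pecha_pages = 1 then 1
  else pvCeil one_sided_pecha_pages (stks * 2) * 2

def pvAppendIfExists (n : Int) (acc : List String) (p : Int) : List String :=
  acc ++ [if p ≤ n then PySem.Int.toStr p else "{}"]

def ordered_page_numbers (number_of_one_sided_pecha_pages : Int) (number_of_stacks : Int) : String :=
  let n := number_of_one_sided_pecha_pages
  let dual := pvCeil n (number_of_stacks * 2)
  let per := pvStackSize n number_of_stacks
  let stackStart := fun (k : Int) => (k - 1) * per + 1
  let pages := (PySem.List.pyRange 0 dual 1).foldl (fun acc i =>
    let dr := i * 2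
    let dv := dr + 1
    let acc := pvAppendIfExists n acc (stackStart 1 + dr)
    let acc := pvAppendIfExists n acc (stackStart 2 + dr)
    let acc := pvAppendIfExists n acc (stackStart 3 + dr)
    let acc := pvAppendIfExists n acc (stackStart 3 + dv)
    let acc := pvAppendIfExists n acc (stackStart 2 + dv)
    pvAppendIfExists n acc (stackStart 1 + dv)) []
  PySem.Str.join "," pages

-- ===== PORT B =====
def pvCell (n p : Int) : String := if p ≤ n then PySem.Int.toStr p else "{}"

def pvColumn (n dual per stack_number : Int) : List (String × String) :=
  let start := (stack_number - 1) * per + 1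
  (PySem.List.pyRange 0 dual 1).foldl (fun col i =>
    let r := start + i * 2
    col ++ [(pvCell n r, pvCell n (r + 1))]) []

def ordered_page_numbers_alt (number_of_one_sided_pecha_pages : Int) (number_of_stacks : Int) : String :=
  let n := number_of_one_sided_pecha_pages
  let dual := pvCeil n (number_of_stacks * 2)
  let per := if n = 1 then 1 else pvCeil n (number_of_stacks * 2) * 2
  let c1 := pvColumn n dual per 1
  let c2 := pvColumn n dual per 2
  let c3 := pvColumn n dual per 3
  let parts := (c1.zip (c2.zip c3)).foldl (fun acc x =>
    acc ++ [x.1.1, x.2.1.1, x.2.2.1, x.2.2.2, x.2.1.2, x.1.2]) []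
  PySem.Str.join "," parts

-- ===== PRECONDITION & SPEC =====
-- Python A raises ZeroDivisionError when number_of_stacks = 0 (so does B); nothing else is excluded.
def Pre_ordered_page_numbers (number_of_one_sided_pecha_pages : Int) (number_of_stacks : Int) : Prop :=
  number_of_stacks ≠ 0
instance (number_of_one_sided_pecha_pages : Int) (number_of_stacks : Int) : Decidable (Pre_ordered_page_numbers number_of_one_sided_pecha_pages number_of_stacks) := by unfold Pre_ordered_page_numbers; infer_instance
def pvWitness_ordered_page_numbers : Int × Int := (7, 3)

def Spec_ordered_page_numbers (number_of_one_sided_pecha_pages : Int) (number_of_stacks : Int) (out : String) : Prop := out = ordered_page_numbers_alt number_of_one_sided_pecha_pages number_of_stacks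
instance (number_of_one_sided_pecha_pages : Int) (number_of_stacks : Int) (out : String) : Decidable (Spec_ordered_page_numbers number_of_one_sided_pecha_pages number_of_stacks out) := by unfold Spec_ordered_page_numbers; infer_instance

-- ===== CLAIM (what is proved, stated in full; the proofs are below) =====
def Claim_equal_ordered_page_numbers : Prop := ∀ (number_of_one_sided_pecha_pages : Int) (number_of_stacks : Int), Dom_ordered_page_numbers number_of_one_sided_pecha_pages number_of_stacks → Pre_ordered_page_numbers number_of_one_sided_pecha_pages number_of_stacks → Spec_ordered_page_numbers number_of_one_sided_pecha_pages number_of_stacks (ordered_page_numbers number_of_one_sided_pecha_pages number_of_stacks)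

-- ===== LEMMAS AND PROOFS =====

-- A's six-append loop body is one append of a six-element row.
theorem pagesA_eq_flatMap (n per dual : Int) :
    (PySem.List.pyRange 0 dual 1).foldl (fun acc i =>
      let dr := i * 2
      let dv := dr + 1
      let acc := pvAppendIfExists n acc ((1 - 1) * per + 1 + dr)
      let acc := pvAppendIfExists n acc ((2 - 1) * per + 1 + dr)
      let acc := pvAppendIfExists n acc ((3 - 1) * per + 1 + dr)
      let acc := pvAppendIfExists n acc ((3 - 1) * per + 1 + dv)
      let acc := pvAppendIfExists n acc ((2 - 1) * per + 1 + dv)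
      pvAppendIfExists n acc ((1 - 1) * per + 1 + dv)) [] =
    (PySem.List.pyRange 0 dual 1).flatMap (fun i =>
      [pvCell n ((1 - 1) * per + 1 + i * 2), pvCell n ((2 - 1) * per + 1 + i * 2),
       pvCell n ((3 - 1) * per + 1 + i * 2), pvCell n ((3 - 1) * per + 1 + (i * 2 + 1)),
       pvCell n ((2 - 1) * per + 1 + (i * 2 + 1)), pvCell n ((1 - 1) * per + 1 + (i * 2 + 1))]) := by
  rw [show (fun (acc : List String) (i : Int) =>
      let dr := i * 2
      let dv := dr + 1
      let acc := pvAppendIfExists n acc ((1 - 1) * per + 1 + dr)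
      let acc := pvAppendIfExists n acc ((2 - 1) * per + 1 + dr)
      let acc := pvAppendIfExists n acc ((3 - 1) * per + 1 + dr)
      let acc := pvAppendIfExists n acc ((3 - 1) * per + 1 + dv)
      let acc := pvAppendIfExists n acc ((2 - 1) * per + 1 + dv)
      pvAppendIfExists n acc ((1 - 1) * per + 1 + dv)) = (fun acc i => acc ++
      [pvCell n ((1 - 1) * per + 1 + i * 2), pvCell n ((2 - 1) * per + 1 + i * 2),
       pvCell n ((3 - 1) * per + 1 + i * 2), pvCell n ((3 - 1) * per + 1 + (i * 2 + 1)),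
       pvCell n ((2 - 1) * per + 1 + (i * 2 + 1)), pvCell n ((1 - 1) * per + 1 + (i * 2 + 1))])
    from by funext acc i; simp [pvAppendIfExists, pvCell]]
  exact PySem.List.foldl_append_eq_flatMap _ _ _

-- A column is a map over the dual-page range.
theorem column_eq_map (n dual per k : Int) :
    pvColumn n dual per k =
      (PySem.List.pyRange 0 dual 1).map (fun i =>
        (pvCell n ((k - 1) * per + 1 + i * 2), pvCell n ((k - 1) * per + 1 + i * 2 + 1))) := by
  unfold pvColumn
  exact PySem.List.foldl_append_singleton_eq_map _ _ _

-- ===== VERDICT (by name: the statement is the Claim_ definition above) =====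
theorem ordered_page_numbers_spec : Claim_equal_ordered_page_numbers := by
  intro n s _ _
  unfold Spec_ordered_page_numbers ordered_page_numbers ordered_page_numbers_alt pvStackSize
  simp only
  set per := if n = 1 then 1 else pvCeil n (s * 2) * 2 with hper
  set dual := pvCeil n (s * 2) with hdual
  rw [pagesA_eq_flatMap n per dual, column_eq_map, column_eq_map, column_eq_map]
  rw [List.zip_map', List.zip_map']
  rw [PySem.List.foldl_append_eq_flatMap, List.flatMap_map]
  simp only [List.nil_append]
  simp only [add_assoc]
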